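-- pv_equiv track=rewrite | github.com/SighingOwl/algorithm | test5.py | solution
-- ===== SOURCE A (Python) =====
-- def listToString(A):
--     result = ""
--     for s in A:
--         result += s
--     return result.strip()
--
-- def solution(s):
--     index = 0
--     tmp_str = []
--     for i in range(len(s)):
--         if s[i] != " ":
--             if index % 2 == 0:
--                 tmp = s[i]
--                 tmp = tmp.upper()
--                 tmp_str.append(tmp)
--                 tmp = []
--                 index += 1
--             else:
--                 tmp_str.append(s[i])
--                 index += 1
--         else:
--             tmp_str.append(s[i])
--             index = 0
--
--     answer = listToString(tmp_str)
--
--     return answer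
-- ===== SOURCE B (Python) =====
-- def solution(s):
--     words = s.split(' ')
--     capped = (''.join(ch.upper() if i % 2 == 0 else ch for i, ch in enumerate(w))
--               for w in words)
--     return ' '.join(capped).strip()
-- ===== Notes on version B (the rewrite author's own statement) =====
-- stated objective: idiomatic
-- what changed: Replaces the char-by-char loop threading a reset-on-space index and an accumulator list through listToString by split-on-space, per-word enumerate-map uppercasing even positions, and a ' '.join plus strip.
import Mathlib
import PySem

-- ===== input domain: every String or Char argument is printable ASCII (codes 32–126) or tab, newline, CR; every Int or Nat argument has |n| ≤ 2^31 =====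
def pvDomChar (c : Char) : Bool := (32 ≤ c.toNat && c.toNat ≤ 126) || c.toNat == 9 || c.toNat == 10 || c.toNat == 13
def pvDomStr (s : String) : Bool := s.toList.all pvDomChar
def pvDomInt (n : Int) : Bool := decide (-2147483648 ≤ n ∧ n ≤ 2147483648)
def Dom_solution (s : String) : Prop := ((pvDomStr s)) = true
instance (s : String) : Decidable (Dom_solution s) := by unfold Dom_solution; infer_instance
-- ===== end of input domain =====

-- B replaces A's single char loop (reset-on-space index, accumulator list) by split / per-word map / join; same return value.

-- ===== PORT A =====
-- helper listToString: concatenate the pieces, then .strip()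
def listToString (A : List (List Char)) : String :=
  String.mk (PySem.Chars.strip (A.foldl (fun result x => result ++ x) []))

def solution (s : String) : String :=
  listToString
    (s.toList.foldl
    (fun (st : Int × List (List Char)) (c : Char) =>
      if c ≠ ' ' then
        if PySem.Int.mod st.1 2 == 0 then
          (st.1 + 1, st.2 ++ [PySem.Chars.upper [c]])
        else
          (st.1 + 1, st.2 ++ [[c]])
      else
        (0, st.2 ++ [[c]]))
      (0, [])).2

-- ===== PORT B =====
-- per-word transform: uppercase the characters at even indices (enumerate)
def capWord (w : List Char) : List Char :=
  (PySem.List.enumerate w).map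
    (fun p => if PySem.Int.mod p.1 2 == 0 then PySem.Chars.upperChar p.2 else p.2)

def solution_alt (s : String) : String :=
  String.mk (PySem.Chars.strip
    (PySem.Chars.join [' '] ((PySem.Chars.splitOn s.toList [' ']).map capWord)))

-- ===== PRECONDITION & SPEC =====
def Spec_solution (s : String) (out : String) : Prop := out = solution_alt s
instance (s : String) (out : String) : Decidable (Spec_solution s out) := by unfold Spec_solution; infer_instance

-- ===== CLAIM (what is proved, stated in full; the proofs are below) =====
def Claim_equal_solution : Prop := ∀ (s : String), Dom_solution s → Spec_solution s (solution s)

-- ===== LEMMAS AND PROOFS =====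

-- the within-word character transform, started at index i
def procW : List Char → Int → List Char
  | [], _ => []
  | c :: cs, i =>
      (if PySem.Int.mod i 2 == 0 then PySem.Chars.upperChar c else c) :: procW cs (i + 1)

-- A's processed character stream (index resets to 0 on a space)
def proc : List Char → Int → List Char
  | [], _ => []
  | c :: cs, i =>
      if c = ' ' then ' ' :: proc cs 0
      else (if PySem.Int.mod i 2 == 0 then PySem.Chars.upperChar c else c) :: proc cs (i + 1)

-- split on a single space, structurally
def consHead (p : List Char) : List (List Char) → List (List Char)
  | [] => [p]
  | w :: ws => (p ++ w) :: ws

def mySplit : List Char → List (List Char)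
  | [] => [[]]
  | c :: cs => if c = ' ' then [] :: mySplit cs else consHead [c] (mySplit cs)

lemma mySplit_ne_nil (cs : List Char) : mySplit cs ≠ [] := by
  cases cs with
  | nil => simp [mySplit]
  | cons c cs =>
    simp only [mySplit]
    split
    · simp
    · cases h : mySplit cs <;> simp [consHead]

lemma consHead_consHead (p q : List Char) (l : List (List Char)) :
    consHead p (consHead q l) = consHead (p ++ q) l := by
  cases l <;> simp [consHead]

lemma go_eq :
    ∀ (l : List Char) (fuel : Nat) (cur : List Char) (acc : List (List Char)),
      l.length < fuel →
      PySem.Chars.splitOn.go [' '] fuel l cur acc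
        = acc.reverse ++ consHead cur.reverse (mySplit l) := by
  intro l
  induction l with
  | nil =>
    intro fuel cur acc h
    cases fuel with
    | zero => omega
    | succ f => simp [PySem.Chars.splitOn.go, mySplit, consHead]
  | cons c rest ih =>
    intro fuel cur acc h
    cases fuel with
    | zero => simp at h
    | succ f =>
      have hlen : rest.length < f := by simpa using h
      by_cases hc : c = ' '
      · subst hc
        simp only [PySem.Chars.splitOn.go, List.isPrefixOf, BEq.rfl, Bool.true_and,
          if_pos]
        have hd : List.drop [' '].length (' ' :: rest) = rest := rfl
        rw [hd, ih f [] (List.reverse cur :: acc) hlen]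
        simp only [mySplit, if_pos, List.reverse_cons]
        cases h2 : mySplit rest with
        | nil => exact absurd h2 (mySplit_ne_nil rest)
        | cons w ws => simp [consHead]
      · have hpre : [' '].isPrefixOf (c :: rest) = false := by
          simp [List.isPrefixOf]
          exact fun hh => hc hh.symm
        simp only [PySem.Chars.splitOn.go, hpre, Bool.false_eq_true, if_neg,
          not_false_eq_true]
        rw [ih f (c :: cur) acc hlen]
        simp only [mySplit, if_neg hc, List.reverse_cons]
        rw [consHead_consHead]
  
lemma splitOn_eq_mySplit (cs : List Char) :
    PySem.Chars.splitOn cs [' '] = mySplit cs := by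
  rw [PySem.Chars.splitOn, go_eq cs (cs.length + 1) [] [] (by omega)]
  cases h : mySplit cs with
  | nil => exact absurd h (mySplit_ne_nil cs)
  | cons w ws => simp [consHead]

-- B's enumerate-map is procW
lemma capWord_from (w : List Char) (i : Int) :
    (PySem.List.enumerate w i).map
      (fun p => if PySem.Int.mod p.1 2 == 0 then PySem.Chars.upperChar p.2 else p.2)
      = procW w i := by
  induction w generalizing i with
  | nil => simp [PySem.List.enumerate_nil, procW]
  | cons c cs ih =>
    rw [PySem.List.enumerate_cons, List.map_cons, ih (i + 1)]
    rfl

lemma capWord_eq (w : List Char) : capWord w = procW w 0 := capWord_from w 0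

-- the joined form of the processed words
def joinTail : List (List Char) → List Char
  | [] => []
  | w :: ws => ' ' :: (procW w 0 ++ joinTail ws)

def joinH (l : List (List Char)) (i : Int) : List Char :=
  match l with
  | [] => []
  | w :: ws => procW w i ++ joinTail ws

lemma proc_eq_joinH (cs : List Char) : ∀ (i : Int), proc cs i = joinH (mySplit cs) i := by
  induction cs with
  | nil => intro i; simp [proc, mySplit, joinH, procW, joinTail]
  | cons c cs ih =>
    intro i
    by_cases hc : c = ' '
    · subst hc
      simp only [proc, mySplit, if_pos]
      rw [ih 0]
      cases h2 : mySplit cs with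
      | nil => exact absurd h2 (mySplit_ne_nil cs)
      | cons w ws => simp [joinH, joinTail, procW]
    · simp only [proc, if_neg hc, mySplit]
      rw [ih (i + 1)]
      cases h2 : mySplit cs with
      | nil => exact absurd h2 (mySplit_ne_nil cs)
      | cons w ws => simp [joinH, procW, consHead]

lemma join_map_eq_joinH (w : List Char) (ws : List (List Char)) :
    PySem.Chars.join [' '] ((w :: ws).map (fun w => procW w 0))
      = procW w 0 ++ joinTail ws := by
  induction ws generalizing w with
  | nil => simp [PySem.Chars.join, joinTail, List.intercalate]
  | cons w' ws' ih =>
    simp only [List.map_cons] at ih ⊢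
    simp only [PySem.Chars.join, List.intercalate] at ih ⊢
    rw [List.intersperse_cons₂, List.flatten_cons, List.flatten_cons, ih w']
    simp [joinTail]

lemma foldA (cs : List Char) :
    ∀ (i : Int) (acc : List (List Char)),
      (cs.foldl
        (fun (st : Int × List (List Char)) (c : Char) =>
          if c ≠ ' ' then
            if PySem.Int.mod st.1 2 == 0 then
              (st.1 + 1, st.2 ++ [PySem.Chars.upper [c]])
            else
              (st.1 + 1, st.2 ++ [[c]])
          else
            (0, st.2 ++ [[c]]))
        (i, acc)).2 = acc ++ (proc cs i).map (fun c => [c]) := by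
  induction cs with
  | nil => intro i acc; simp [proc]
  | cons c cs ih =>
    intro i acc
    by_cases hc : c = ' '
    · subst hc
      simp only [List.foldl_cons, ne_eq, not_true_eq_false, if_false]
      rw [ih 0]
      simp [proc]
    · by_cases hm : PySem.Int.mod i 2 == 0
      · simp only [List.foldl_cons, ne_eq, hc, not_false_eq_true, if_pos, hm]
        rw [ih (i + 1)]
        simp only [proc]
        rw [if_neg hc, if_pos hm]
        simp [PySem.Chars.upper]
      · simp only [List.foldl_cons, ne_eq, hc, not_false_eq_true, if_pos, hm,
          Bool.false_eq_true, if_neg]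
        rw [ih (i + 1)]
        simp only [proc]
        rw [if_neg hc, if_neg hm]
        simp

lemma flatten_singletons (l : List Char) :
    (l.map (fun c => [c])).foldl (fun r x => r ++ x) ([] : List Char) = l := by
  rw [PySem.List.foldl_append_eq_flatten]
  induction l with
  | nil => simp
  | cons c cs ih => simpa using ih

-- ===== VERDICT (by name: the statement is the Claim_ definition above) =====
theorem solution_spec : Claim_equal_solution := by
  intro s _
  show solution s = solution_alt s
  unfold solution solution_alt listToString
  rw [foldA s.toList 0 []]
  rw [List.nil_append]
  rw [flatten_singletons]
  rw [splitOn_eq_mySplit]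
  rw [List.map_congr_left (fun w _ => capWord_eq w)]
  congr 1
  cases h2 : mySplit s.toList with
  | nil => exact absurd h2 (mySplit_ne_nil s.toList)
  | cons w ws =>
      rw [join_map_eq_joinH]
      rw [proc_eq_joinH s.toList 0, h2]
      rfl
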